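-- pv_equiv track=rewrite | github.com/SeemplicityDev/spark-aggregation-poc | src/spark_aggregation_poc/dal/read_service_raw_join_multi_connections.py | create_connection_ranges
-- ===== SOURCE A (Python) =====
-- from typing import List, Tuple
--
-- def create_connection_ranges(min_id: int, max_id: int, num_connections: int) -> List[Tuple[int, int]]:
--     """Create evenly distributed ID ranges for each connection"""
--     ranges = []
--     total_range = max_id - min_id + 1
--     range_per_connection = total_range // num_connections
--     remainder = total_range % num_connections
--
--     current_start = min_id
--
--     for i in range(num_connections):
--         # Add one extra ID to first 'remainder' connections to distribute remainder evenly
--         extra = 1 if i < remainder else 0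
--         range_size = range_per_connection + extra
--
--         current_end = current_start + range_size - 1
--
--         # Ensure last connection goes to actual max_id
--         if i == num_connections - 1:
--             current_end = max_id
--
--         ranges.append((current_start, current_end))
--         current_start = current_end + 1
--
--     return ranges
-- ===== SOURCE B (Python) =====
-- def create_connection_ranges(min_id: int, max_id: int, num_connections: int):
--     """Create evenly distributed ID ranges for each connection (closed form, no carried state)"""
--     range_per_connection, remainder = divmod(max_id - min_id + 1, num_connections)
--     return [
--         (min_id + i * range_per_connection + min(i, remainder),
--          min_id + i * range_per_connection + min(i, remainder)
--          + range_per_connection + (1 if i < remainder else 0) - 1)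
--         for i in range(num_connections)
--     ]
-- ===== Notes on version B (the rewrite author's own statement) =====
-- stated objective: simpler
-- what changed: Replaced the stateful loop carrying current_start (with a last-connection max_id override) by a stateless list comprehension computing each range in closed form from its index via divmod; the override is provably redundant.
import Mathlib
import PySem

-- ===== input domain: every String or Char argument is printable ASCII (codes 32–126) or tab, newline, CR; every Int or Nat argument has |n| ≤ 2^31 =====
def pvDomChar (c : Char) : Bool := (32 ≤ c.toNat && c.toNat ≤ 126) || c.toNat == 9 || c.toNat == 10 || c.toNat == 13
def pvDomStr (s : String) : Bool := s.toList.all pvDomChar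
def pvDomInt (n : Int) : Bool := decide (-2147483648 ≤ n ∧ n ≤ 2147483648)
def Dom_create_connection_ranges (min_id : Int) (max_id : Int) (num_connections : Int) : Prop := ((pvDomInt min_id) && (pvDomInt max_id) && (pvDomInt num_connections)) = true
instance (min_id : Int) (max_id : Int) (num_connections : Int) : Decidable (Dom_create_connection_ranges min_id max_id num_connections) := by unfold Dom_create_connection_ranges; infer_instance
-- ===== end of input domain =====

-- B replaces A's stateful loop (carrying current_start, with a last-connection override)
-- by a stateless closed-form list comprehension; the override is provably redundant.

-- ===== PORT A =====
def create_connection_ranges (min_id : Int) (max_id : Int) (num_connections : Int) : List (Int × Int) :=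
  let total_range := max_id - min_id + 1
  let range_per_connection := PySem.Int.floordiv total_range num_connections
  let remainder := PySem.Int.mod total_range num_connections
  let st := (PySem.List.pyRange 0 num_connections 1).foldl
    (fun (st : List (Int × Int) × Int) i =>
      let extra : Int := if i < remainder then 1 else 0
      let range_size := range_per_connection + extra
      let current_end := st.2 + range_size - 1
      let current_end := if i = num_connections - 1 then max_id else current_end
      (st.1 ++ [(st.2, current_end)], current_end + 1))
    ([], min_id)
  st.1

-- ===== PORT B =====
def create_connection_ranges_alt (min_id : Int) (max_id : Int) (num_connections : Int) : List (Int × Int) :=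
  let range_per_connection := PySem.Int.floordiv (max_id - min_id + 1) num_connections
  let remainder := PySem.Int.mod (max_id - min_id + 1) num_connections
  (PySem.List.pyRange 0 num_connections 1).map (fun i =>
    (min_id + i * range_per_connection + min i remainder,
     min_id + i * range_per_connection + min i remainder
       + range_per_connection + (if i < remainder then 1 else 0) - 1))

-- ===== PRECONDITION & SPEC =====
-- Pre_ excludes only num_connections = 0, where Python A raises ZeroDivisionError.
def Pre_create_connection_ranges (min_id : Int) (max_id : Int) (num_connections : Int) : Prop := num_connections ≠ 0
instance (min_id : Int) (max_id : Int) (num_connections : Int) : Decidable (Pre_create_connection_ranges min_id max_id num_connections) := by unfold Pre_create_connection_ranges; infer_instance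

def pvWitness_create_connection_ranges : Int × Int × Int := (1, 10, 3)

def Spec_create_connection_ranges (min_id : Int) (max_id : Int) (num_connections : Int) (out : List (Int × Int)) : Prop := out = create_connection_ranges_alt min_id max_id num_connections
instance (min_id : Int) (max_id : Int) (num_connections : Int) (out : List (Int × Int)) : Decidable (Spec_create_connection_ranges min_id max_id num_connections out) := by unfold Spec_create_connection_ranges; infer_instance

-- ===== CLAIM (what is proved, stated in full; the proofs are below) =====
def Claim_equal_create_connection_ranges : Prop := ∀ (min_id : Int) (max_id : Int) (num_connections : Int), Dom_create_connection_ranges min_id max_id num_connections → Pre_create_connection_ranges min_id max_id num_connections → Spec_create_connection_ranges min_id max_id num_connections (create_connection_ranges min_id max_id num_connections)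

-- ===== LEMMAS AND PROOFS =====

-- Start of connection i in closed form.
def pvStart (min_id rpc rem : Int) (i : Int) : Int := min_id + i * rpc + min i rem

-- Core loop invariant: folding A's body over [a, n) from start pvStart a appends exactly
-- B's closed-form pairs, provided rpc*n + rem = total and 0 ≤ rem < n.
theorem fold_inv (min_id max_id n rpc rem : Int)
    (hrn : rem < n)
    (htot : rpc * n + rem = max_id - min_id + 1) :
    ∀ (k : Nat) (a : Int) (acc : List (Int × Int)), 0 ≤ a → a + k = n →
      ((PySem.List.pyRange a n 1).foldl
        (fun (st : List (Int × Int) × Int) i =>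
          let extra : Int := if i < rem then 1 else 0
          let range_size := rpc + extra
          let current_end := st.2 + range_size - 1
          let current_end := if i = n - 1 then max_id else current_end
          (st.1 ++ [(st.2, current_end)], current_end + 1))
        (acc, pvStart min_id rpc rem a)).1
      = acc ++ (PySem.List.pyRange a n 1).map (fun i =>
          (pvStart min_id rpc rem i,
           pvStart min_id rpc rem i + rpc + (if i < rem then 1 else 0) - 1)) := by
  intro k
  induction k with
  | zero =>
    intro a acc _ hk
    have hna : n ≤ a := by omega
    rw [PySem.List.pyRange_one_eq_nil hna]
    simp
  | succ m ih =>
    intro a acc ha hk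
    have han : a < n := by omega
    rw [PySem.List.pyRange_one_cons han]
    simp only [List.foldl_cons, List.map_cons]
    -- the pair emitted at index a equals B's closed-form pair
    have hpair : (if a = n - 1 then max_id
        else pvStart min_id rpc rem a + (rpc + (if a < rem then 1 else 0)) - 1)
        = pvStart min_id rpc rem a + rpc + (if a < rem then 1 else 0) - 1 := by
      by_cases hlast : a = n - 1
      · subst hlast
        have h1 : ¬ (n - 1 < rem) := by omega
        have h2 : min (n - 1) rem = rem := by omega
        simp only [if_true, h2, if_neg h1, pvStart]
        linear_combination -htot
      · simp only [if_neg hlast, add_assoc]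
    by_cases hlast : a = n - 1
    · -- last iteration: the tail range is empty
      have hnil : PySem.List.pyRange (a + 1) n 1 = [] :=
        PySem.List.pyRange_one_eq_nil (by omega)
      rw [hnil]
      simp only [List.foldl_nil, List.map_nil]
      rw [hpair]
    · -- non-last: next start is pvStart (a+1)
      have hnext : (if a = n - 1 then max_id
          else pvStart min_id rpc rem a + (rpc + (if a < rem then 1 else 0)) - 1) + 1
          = pvStart min_id rpc rem (a + 1) := by
        simp only [if_neg hlast, pvStart]
        by_cases hi : a < rem
        · have h1 : min a rem = a := by omega
          have h2 : min (a + 1) rem = a + 1 := by omega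
          simp [hi, h1]; ring
        · have h1 : min a rem = rem := by omega
          have h2 : min (a + 1) rem = rem := by omega
          simp [hi, h1, h2]; ring
      rw [hnext, ih (a + 1) (acc ++ [_]) (by omega) (by omega), hpair]
      simp

-- ===== VERDICT (by name: the statement is the Claim_ definition above) =====
theorem create_connection_ranges_spec : Claim_equal_create_connection_ranges := by
  intro min_id max_id n _ hpre
  unfold Spec_create_connection_ranges create_connection_ranges create_connection_ranges_alt
  by_cases hn : 0 < n
  · set total := max_id - min_id + 1 with htdef
    set rpc := PySem.Int.floordiv total n with hrpc
    set rem := PySem.Int.mod total n with hrem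
    have hmod : rem = total % n := by
      rw [hrem]; exact PySem.Int.mod_eq_emod_of_pos hn
    have hr0 : 0 ≤ rem := by rw [hmod]; exact Int.emod_nonneg total (by omega)
    have hrn : rem < n := by rw [hmod]; exact Int.emod_lt_of_pos total hn
    have htot : rpc * n + rem = max_id - min_id + 1 := by
      have := PySem.Int.floordiv_mul_add_mod total n
      rw [← hrpc, ← hrem] at this; omega
    have h0 : pvStart min_id rpc rem 0 = min_id := by
      simp [pvStart]; omega
    have := fold_inv min_id max_id n rpc rem hrn htot n.toNat 0 [] le_rfl (by omega)
    rw [h0] at this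
    simpa [pvStart] using this
  · have hnil : PySem.List.pyRange 0 n 1 = [] :=
      PySem.List.pyRange_one_eq_nil (by omega)
    simp [hnil]
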